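-- pv_equiv track=rewrite | github.com/ivanillera/TP1Sintaxis | fun.py | a_fun
-- ===== SOURCE A (Python) =====
-- TRAMPA = -1
--
-- RESULTADO_ACEPTADO = "ACEPTADO"
--
-- RESULTADO_TRAMPA = "TRAMPA"
--
-- RESULTADO_NO_ACEPTADO = "NO_ACEPTADO"
--
-- def d_fun(estado_anterior, caracter):
--     if estado_anterior == 0 and caracter == "f":
--         return 1
--     if estado_anterior == 1 and caracter == "u":
--         return 2
--     if estado_anterior == 2 and caracter == "n":
--         return 3
--
--
--     return TRAMPA
--
-- def a_fun(cadena):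
--     Finales = [3]
--     estado_actual = 0
--
--     for caracter in cadena:
--         estado_proximo = d_fun(estado_actual, caracter)
--         if estado_proximo == TRAMPA:
--             return RESULTADO_TRAMPA
--         estado_actual = estado_proximo
--
--     if estado_actual in Finales:
--         return RESULTADO_ACEPTADO
--     else:
--         return RESULTADO_NO_ACEPTADO
-- ===== SOURCE B (Python) =====
-- TRAMPA = -1
-- RESULTADO_ACEPTADO = "ACEPTADO"
-- RESULTADO_TRAMPA = "TRAMPA"
-- RESULTADO_NO_ACEPTADO = "NO_ACEPTADO"
--
-- def a_fun(cadena):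
--     if cadena == "fun":
--         return RESULTADO_ACEPTADO
--     if "fun".startswith(cadena):
--         return RESULTADO_NO_ACEPTADO
--     return RESULTADO_TRAMPA
-- ===== Notes on version B (the rewrite author's own statement) =====
-- stated objective: simpler
-- what changed: Replaced the per-character DFA loop with a closed-form test: equality with 'fun' accepts, a proper prefix of 'fun' is NO_ACEPTADO, anything else is TRAMPA; no transition function and no iteration.
import Mathlib
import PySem

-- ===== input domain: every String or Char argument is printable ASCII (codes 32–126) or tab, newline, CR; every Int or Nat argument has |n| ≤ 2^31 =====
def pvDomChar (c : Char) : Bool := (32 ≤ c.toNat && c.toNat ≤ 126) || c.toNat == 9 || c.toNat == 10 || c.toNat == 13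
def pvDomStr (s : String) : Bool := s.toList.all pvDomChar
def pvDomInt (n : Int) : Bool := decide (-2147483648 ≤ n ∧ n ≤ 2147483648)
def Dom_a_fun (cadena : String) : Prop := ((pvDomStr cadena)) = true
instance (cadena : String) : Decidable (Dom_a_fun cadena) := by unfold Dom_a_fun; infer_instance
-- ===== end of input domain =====

-- B replaces A's per-character DFA loop by a closed-form test (equality / prefix of "fun"); objective: simpler.

-- ===== PORT A =====
def d_fun (estado_anterior : Int) (caracter : Char) : Int :=
  if estado_anterior = 0 ∧ caracter = 'f' then 1
  else if estado_anterior = 1 ∧ caracter = 'u' then 2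
  else if estado_anterior = 2 ∧ caracter = 'n' then 3
  else -1

def aFunLoop (estado_actual : Int) : List Char → String
  | [] => if estado_actual = 3 then "ACEPTADO" else "NO_ACEPTADO"
  | caracter :: rest =>
    let estado_proximo := d_fun estado_actual caracter
    if estado_proximo = -1 then "TRAMPA" else aFunLoop estado_proximo rest

def a_fun (cadena : String) : String := aFunLoop 0 cadena.toList

-- ===== PORT B =====
def a_fun_alt (cadena : String) : String :=
  if cadena = "fun" then "ACEPTADO"
  else if PySem.Str.startswith "fun" cadena then "NO_ACEPTADO"
  else "TRAMPA"

-- ===== PRECONDITION & SPEC =====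
def Spec_a_fun (cadena : String) (out : String) : Prop := out = a_fun_alt cadena
instance (cadena : String) (out : String) : Decidable (Spec_a_fun cadena out) := by unfold Spec_a_fun; infer_instance

-- ===== CLAIM (what is proved, stated in full; the proofs are below) =====
def Claim_equal_a_fun : Prop := ∀ (cadena : String), Dom_a_fun cadena → Spec_a_fun cadena (a_fun cadena)

-- ===== LEMMAS AND PROOFS =====

-- A's loop, characterised over the character list.
theorem aFunLoop_char (l : List Char) :
    aFunLoop 0 l =
      (if l = ['f', 'u', 'n'] then "ACEPTADO"
       else if l <+: ['f', 'u', 'n'] then "NO_ACEPTADO"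
       else "TRAMPA") := by
  match l with
  | [] => simp [aFunLoop]
  | c :: l1 =>
    by_cases hc : c = 'f'
    · subst hc
      match l1 with
      | [] => simp [aFunLoop, d_fun, List.cons_prefix_iff]
      | c2 :: l2 =>
        by_cases hc2 : c2 = 'u'
        · subst hc2
          match l2 with
          | [] => simp [aFunLoop, d_fun, List.cons_prefix_iff]
          | c3 :: l3 =>
            by_cases hc3 : c3 = 'n'
            · subst hc3
              match l3 with
              | [] => simp [aFunLoop, d_fun]
              | c4 :: l4 =>
                simp [aFunLoop, d_fun, List.cons_prefix_iff]
            · simp [aFunLoop, d_fun, hc3, List.cons_prefix_iff]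
              exact fun h => absurd h.symm hc3
        · simp [aFunLoop, d_fun, hc2, List.cons_prefix_iff]
          exact fun h => absurd h.symm hc2
    · simp [aFunLoop, d_fun, hc, List.cons_prefix_iff]
      exact fun h => absurd h.symm hc

theorem a_fun_spec : Claim_equal_a_fun := by
  intro cadena _
  show a_fun cadena = a_fun_alt cadena
  unfold a_fun a_fun_alt
  rw [aFunLoop_char]
  have hs : PySem.Str.startswith "fun" cadena =
      PySem.Chars.startswith ['f', 'u', 'n'] cadena.toList := by
    simp
  have heq : (cadena = "fun") ↔ (cadena.toList = ['f', 'u', 'n']) := by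
    constructor
    · intro h; subst h; rfl
    · intro h
      have := congrArg String.ofList h
      simpa using this
  have hpre : (PySem.Chars.startswith ['f', 'u', 'n'] cadena.toList = true) ↔
      (cadena.toList <+: ['f', 'u', 'n']) :=
    PySem.Chars.startswith_iff ['f', 'u', 'n'] cadena.toList
  by_cases h1 : cadena.toList = ['f', 'u', 'n']
  · simp [heq.mpr h1]
  · have h1' : ¬ cadena = "fun" := fun h => h1 (heq.mp h)
    by_cases h2 : cadena.toList <+: ['f', 'u', 'n']
    · rw [hs, hpre.mpr h2]; simp [h1', h1]; exact h2
    · have : PySem.Chars.startswith ['f', 'u', 'n'] cadena.toList = false := by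
        cases hb : PySem.Chars.startswith ['f', 'u', 'n'] cadena.toList
        · rfl
        · exact absurd (hpre.mp hb) h2
      rw [hs, this]; simp [h1', h1]; exact h2

-- ===== VERDICT (by name: the statement is the Claim_ definition above) =====
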